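-- pv_equiv track=rewrite | github.com/juliafealves/linguagem-programacao-1 | unidade-9/toppl/toppl.py | filtra_alunos
-- ===== SOURCE A (Python) =====
-- def verificar_inscrito(aluno, inscritos):
--     for inscrito in inscritos:
--         if aluno == inscrito:
--             return True
--
--     return False
--
-- def filtra_alunos(alunos, inscritos, media_corte):
--     removidos = 0
--
--     for i in range(len(alunos) -1, -1, -1):
--         aluno = alunos[i]
--
--         if not verificar_inscrito(aluno[0], inscritos) or aluno[1] < media_corte:
--             alunos.pop(i)
--             removidos += 1
--
--     return removidos
-- ===== SOURCE B (Python) =====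
-- def filtra_alunos(alunos, inscritos, media_corte):
--     presentes = set(inscritos)
--     mantidos = [a for a in alunos if a[0] in presentes and a[1] >= media_corte]
--     removidos = len(alunos) - len(mantidos)
--     alunos[:] = mantidos
--     return removidos
-- ===== Notes on version B (the rewrite author's own statement) =====
-- stated objective: faster
-- what changed: Replaces the destructive backward index loop (pop per removal, linear membership scan per student) with one forward filter over a prebuilt set of inscritos; the count is the length difference and the survivors are slice-assigned back in place.
import Mathlib
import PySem

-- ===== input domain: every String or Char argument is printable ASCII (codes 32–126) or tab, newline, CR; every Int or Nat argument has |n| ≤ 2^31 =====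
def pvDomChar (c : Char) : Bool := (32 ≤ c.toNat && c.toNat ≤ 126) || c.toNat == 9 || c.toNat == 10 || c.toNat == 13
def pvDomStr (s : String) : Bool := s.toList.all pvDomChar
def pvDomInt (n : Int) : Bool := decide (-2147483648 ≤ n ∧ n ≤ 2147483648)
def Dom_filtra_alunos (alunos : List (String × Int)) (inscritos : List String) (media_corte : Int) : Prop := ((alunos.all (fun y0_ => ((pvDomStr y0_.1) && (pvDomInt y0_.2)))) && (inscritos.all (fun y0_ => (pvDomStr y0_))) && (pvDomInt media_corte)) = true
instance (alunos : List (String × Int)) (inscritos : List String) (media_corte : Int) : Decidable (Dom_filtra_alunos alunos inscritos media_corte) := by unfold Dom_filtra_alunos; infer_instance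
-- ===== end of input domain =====

-- B replaces A's destructive backward pop-and-count loop by one forward filter against a
-- set of inscritos, counting by length difference (equivalence is about the RETURN value;
-- both Pythons leave the surviving students in alunos, in the same order).

-- ===== PORT A =====
def verificar_inscrito (aluno : String) (inscritos : List String) : Bool :=
  match inscritos with
  | [] => false
  | inscrito :: rest => if aluno == inscrito then true else verificar_inscrito aluno rest

-- loop body of A's 'for i in range(len(alunos)-1, -1, -1)'; the pyGetD default and the
-- 'none' branch of pop? are unreachable (i is always a valid index of the shrunken list)
def filtraStep (inscritos : List String) (media_corte : Int)
    (st : List (String × Int) × Int) (i : Int) : List (String × Int) × Int :=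
  let aluno := PySem.List.pyGetD st.1 i ("", 0)
  if !(verificar_inscrito aluno.1 inscritos) || aluno.2 < media_corte then
    match PySem.List.pop? st.1 i with
    | some p => (p.2, st.2 + 1)
    | none => st
  else st

def filtra_alunos (alunos : List (String × Int)) (inscritos : List String) (media_corte : Int) : Int :=
  ((PySem.List.pyRange ((alunos.length : Int) - 1) (-1) (-1)).foldl
      (filtraStep inscritos media_corte) (alunos, 0)).2

-- ===== PORT B =====
def filtra_alunos_alt (alunos : List (String × Int)) (inscritos : List String) (media_corte : Int) : Int :=
  let presentes : PySem.Set String := PySem.Set.ofList inscritos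
  let mantidos := alunos.filter (fun a => PySem.Set.contains presentes a.1 && decide (media_corte ≤ a.2))
  (alunos.length : Int) - (mantidos.length : Int)

-- ===== PRECONDITION & SPEC =====
def Spec_filtra_alunos (alunos : List (String × Int)) (inscritos : List String) (media_corte : Int) (out : Int) : Prop := out = filtra_alunos_alt alunos inscritos media_corte
instance (alunos : List (String × Int)) (inscritos : List String) (media_corte : Int) (out : Int) : Decidable (Spec_filtra_alunos alunos inscritos media_corte out) := by unfold Spec_filtra_alunos; infer_instance

-- ===== CLAIM (what is proved, stated in full; the proofs are below) =====
def Claim_equal_filtra_alunos : Prop := ∀ (alunos : List (String × Int)) (inscritos : List String) (media_corte : Int), Dom_filtra_alunos alunos inscritos media_corte → Spec_filtra_alunos alunos inscritos media_corte (filtra_alunos alunos inscritos media_corte)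

-- ===== LEMMAS AND PROOFS =====


lemma eraseIdx_append_cons {α : Type} (l1 : List α) (a : α) (l2 : List α) :
    (l1 ++ a :: l2).eraseIdx l1.length = l1 ++ l2 := by
  induction l1 with
  | nil => simp
  | cons x xs ih => simp [ih]

lemma getD_append_cons {α : Type} [Inhabited α] (l1 : List α) (a : α) (l2 : List α) (d : α) :
    (l1 ++ a :: l2).getD l1.length d = a := by
  simp [List.getD]

-- A's keep predicate
def keepA (inscritos : List String) (media_corte : Int) (a : String × Int) : Bool :=
  verificar_inscrito a.1 inscritos && !decide (a.2 < media_corte)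

lemma verificar_inscrito_iff (s : String) (xs : List String) :
    verificar_inscrito s xs = true ↔ s ∈ xs := by
  induction xs with
  | nil => simp [verificar_inscrito]
  | cons x rest ih =>
    simp only [verificar_inscrito, List.mem_cons]
    split
    · next h => simp_all [beq_iff_eq]
    · next h => simp_all [beq_iff_eq]

-- A's loop invariant: having already filtered the suffix, processing the indices of the
-- prefix (from high to low) filters the prefix and adds its removal count.
lemma loopA (inscritos : List String) (m : Int) :
    ∀ (pre suf : List (String × Int)) (r : Int),
      (PySem.List.pyRange ((pre.length : Int) - 1) (-1) (-1)).foldl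
          (filtraStep inscritos m) (pre ++ suf.filter (keepA inscritos m), r)
      = (pre.filter (keepA inscritos m) ++ suf.filter (keepA inscritos m),
         r + ((pre.length : Int) - ((pre.filter (keepA inscritos m)).length : Int))) := by
  intro pre
  induction pre using List.reverseRecOn with
  | nil =>
    intro suf r
    rw [PySem.List.pyRange_neg_one_eq_nil (by norm_num)]
    simp
  | append_singleton pre' a ih =>
    intro suf r
    have hlen : ((pre' ++ [a]).length : Int) - 1 = (pre'.length : Int) := by
      simp
    rw [hlen, PySem.List.pyRange_neg_one_cons (by omega), List.foldl_cons]
    have hget : PySem.List.pyGetD ((pre' ++ [a]) ++ suf.filter (keepA inscritos m)) (pre'.length : Int) ("", 0) = a := by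
      rw [PySem.List.pyGetD_natCast]
      rw [List.append_assoc]
      exact getD_append_cons pre' a _ _
    have hpop : PySem.List.pop? ((pre' ++ [a]) ++ suf.filter (keepA inscritos m)) (pre'.length : Int)
        = some (a, pre' ++ suf.filter (keepA inscritos m)) := by
      have key : PySem.List.pop? (pre' ++ a :: suf.filter (keepA inscritos m)) (pre'.length : Int)
          = some (a, pre' ++ suf.filter (keepA inscritos m)) := by
        rw [PySem.List.pop?_natCast _ pre'.length (by simp)]
        congr 1
        refine Prod.ext ?_ ?_
        · simp [List.getElem_append_right (Nat.le_refl pre'.length)]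
        · exact eraseIdx_append_cons pre' a _
      rw [List.append_assoc, List.singleton_append]
      exact key
    by_cases hk : keepA inscritos m a = true
    · have hcond : (!(verificar_inscrito a.1 inscritos) || decide (a.2 < m)) = false := by
        unfold keepA at hk; simp_all
      have hstep : filtraStep inscritos m ((pre' ++ [a]) ++ suf.filter (keepA inscritos m), r) (pre'.length : Int)
          = (pre' ++ (a :: suf).filter (keepA inscritos m), r) := by
        simp only [filtraStep, hget, hcond, List.filter_cons, hk, ite_true]
        simp [List.append_assoc]
      rw [hstep, ih (a :: suf) r]
      simp [List.filter_append, hk]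
    · have hcond : (!(verificar_inscrito a.1 inscritos) || decide (a.2 < m)) = true := by
        unfold keepA at hk
        by_cases hv : verificar_inscrito a.1 inscritos = true
        · have h2 : a.2 < m := by simpa [hv] using hk
          simp [h2]
        · simp [Bool.not_eq_true] at hv
          simp [hv]
      have hstep : filtraStep inscritos m ((pre' ++ [a]) ++ suf.filter (keepA inscritos m), r) (pre'.length : Int)
          = (pre' ++ (a :: suf).filter (keepA inscritos m), r + 1) := by
        simp only [filtraStep, hget, hcond, if_true, hpop]
        simp [hk]
      rw [hstep, ih (a :: suf) (r + 1)]
      simp [List.filter_append, hk]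
      have : (List.filter (keepA inscritos m) pre').length ≤ pre'.length := List.length_filter_le _ _
      omega

lemma filter_eq (inscritos : List String) (m : Int) (alunos : List (String × Int)) :
    alunos.filter (keepA inscritos m)
      = alunos.filter (fun a => PySem.Set.contains (PySem.Set.ofList inscritos) a.1 && decide (m ≤ a.2)) := by
  apply List.filter_congr
  intro a _
  unfold keepA
  congr 1
  · rcases hv : verificar_inscrito a.1 inscritos with _ | _
    · have : a.1 ∉ inscritos := fun h => by simp [(verificar_inscrito_iff a.1 inscritos).mpr h] at hv
      simp [PySem.Set.mem_ofList, this]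
    · have : a.1 ∈ inscritos := (verificar_inscrito_iff a.1 inscritos).mp hv
      simp [PySem.Set.mem_ofList, this]
  · by_cases h : a.2 < m
    · simp [h, not_le.mpr h]
    · simp [h, not_lt.mp h]

theorem filtra_alunos_spec : Claim_equal_filtra_alunos := by
  intro alunos inscritos m _
  unfold Spec_filtra_alunos filtra_alunos filtra_alunos_alt
  have h := loopA inscritos m alunos [] 0
  simp only [List.filter_nil, List.append_nil] at h
  rw [h]
  rw [filter_eq]
  simp
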